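-- pv_equiv track=rewrite | github.com/estnia/Unipdf | pdfviewer/workers/gbt_toc_worker.py | _filter_appendix_l2
-- ===== SOURCE A (Python) =====
-- from typing import Optional, List, Dict, Any
--
-- def _filter_appendix_l2(headings: List[Dict]) -> List[Dict]:
--     """过滤掉附录下的L2（附录内部小节不需要在目录中显示）"""
--     if not headings:
--         return headings
--
--     # 找到第一个附录的位置
--     appendix_start_idx = None
--     for i, h in enumerate(headings):
--         if h.get("is_appendix"):
--             appendix_start_idx = i
--             break
--
--     # 如果没有附录，直接返回
--     if appendix_start_idx is None:
--         return headings
--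
--     # 只保留附录前的L2和附录本身（L1）
--     result = []
--     for i, h in enumerate(headings):
--         if h["level"] == 1:
--             result.append(h)
--         elif h["level"] == 2:
--             # 只保留附录前的L2
--             if i < appendix_start_idx:
--                 result.append(h)
--             # 附录后的L2（附录内部小节）被过滤掉
--
--     return result
-- ===== SOURCE B (Python) =====
-- from typing import Optional, List, Dict, Any
--
-- def _filter_appendix_l2(headings: List[Dict]) -> List[Dict]:
--     """Single pass over one iterator: buffer headings until an appendix appears,
--     then flush the L1/L2 ones and drain the rest of the same iterator keeping L1 only."""
--     pending = []
--     it = iter(headings)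
--     for h in it:
--         if h.get("is_appendix"):
--             out = [x for x in pending if x["level"] in (1, 2)]
--             if h["level"] == 1:
--                 out.append(h)
--             for x in it:
--                 if x["level"] == 1:
--                     out.append(x)
--             return out
--         pending.append(h)
--     return headings
-- ===== Notes on version B (the rewrite author's own statement) =====
-- stated objective: alternative
-- what changed: Replaces A's two indexed passes (find the first appendix index, then loop comparing i < appendix_start_idx) by a single pass over one shared iterator: headings are buffered until an appendix is seen, then the buffer is flushed (L1/L2) and the remainder of the same iterator is drained keeping only L1; no indices or slices at all.
import Mathlib
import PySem

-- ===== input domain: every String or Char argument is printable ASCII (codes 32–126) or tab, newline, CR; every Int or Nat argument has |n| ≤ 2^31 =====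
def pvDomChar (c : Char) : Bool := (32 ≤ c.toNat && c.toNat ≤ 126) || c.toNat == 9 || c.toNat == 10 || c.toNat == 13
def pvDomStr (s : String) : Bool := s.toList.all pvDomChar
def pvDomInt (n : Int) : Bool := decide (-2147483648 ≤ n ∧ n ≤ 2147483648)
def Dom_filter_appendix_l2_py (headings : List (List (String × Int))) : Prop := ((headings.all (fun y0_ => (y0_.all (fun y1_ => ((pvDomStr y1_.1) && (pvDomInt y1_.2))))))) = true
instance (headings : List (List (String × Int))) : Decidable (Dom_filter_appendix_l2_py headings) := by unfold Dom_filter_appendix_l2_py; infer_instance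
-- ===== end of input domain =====

-- B replaces A's two indexed passes (find first appendix index, then loop with i < idx)
-- by one pass over a shared iterator with a pending buffer (objective: alternative, same cost).

-- ===== PORT A =====
-- dict.get(k) on an association list: first match (none = missing key)
def pvGetA (d : List (String × Int)) (k : String) : Option Int :=
  match d with
  | [] => none
  | (k', v) :: t => if k' == k then some v else pvGetA t k

-- the first loop of A: enumerate with break, returning the index of the first truthy "is_appendix"
def pvFindAppA (headings : List (List (String × Int))) (i : Nat) : Option Nat :=
  match headings with
  | [] => none
  | h :: t => if (pvGetA h "is_appendix").any (fun v => v != 0) then some i else pvFindAppA t (i + 1)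

-- the second loop of A: build result, keeping L1 always and L2 only when i < appendix_start_idx.
-- h["level"] raises KeyError on a missing key; Pre_ excludes that, so the default 0 is never read.
def pvLoopA (idx : Nat) (headings : List (List (String × Int))) (i : Nat) : List (List (String × Int)) :=
  match headings with
  | [] => []
  | h :: t =>
    let lv := (pvGetA h "level").getD 0
    if lv == 1 then h :: pvLoopA idx t (i + 1)
    else if lv == 2 then
      (if i < idx then h :: pvLoopA idx t (i + 1) else pvLoopA idx t (i + 1))
    else pvLoopA idx t (i + 1)

def filter_appendix_l2_py (headings : List (List (String × Int))) : List (List (String × Int)) :=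
  if headings = [] then headings
  else
    match pvFindAppA headings 0 with
    | none => headings
    | some idx => pvLoopA idx headings 0

-- ===== PORT B =====
-- the inner drain loop of Source B: the rest of the iterator, keeping only L1
def pvRestB (hs : List (List (String × Int))) : List (List (String × Int)) :=
  match hs with
  | [] => []
  | x :: t => if (pvGetA x "level").getD 0 == 1 then x :: pvRestB t else pvRestB t

-- the main loop of Source B: buffer into `pending` until an appendix is seen; `none` = loop
-- finished without an appendix (Source B then returns `headings` unchanged)
def pvScanB (pending : List (List (String × Int))) (hs : List (List (String × Int))) :
    Option (List (List (String × Int))) :=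
  match hs with
  | [] => none
  | h :: t =>
    if (pvGetA h "is_appendix").any (fun v => v != 0) then
      some ((pending.filter (fun x => let lv := (pvGetA x "level").getD 0; lv == 1 || lv == 2))
        ++ (if (pvGetA h "level").getD 0 == 1 then [h] else []) ++ pvRestB t)
    else pvScanB (pending ++ [h]) t

def filter_appendix_l2_py_alt (headings : List (List (String × Int))) : List (List (String × Int)) :=
  (pvScanB [] headings).getD headings

-- ===== PRECONDITION & SPEC =====
-- Pre_ excludes exactly the inputs on which A (and B) raises KeyError: an appendix heading
-- exists but some heading has no "level" key (then h["level"] raises).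
def Pre_filter_appendix_l2_py (headings : List (List (String × Int))) : Prop :=
  (∃ h ∈ headings, (pvGetA h "is_appendix").any (fun v => v != 0)) →
    ∀ h ∈ headings, (pvGetA h "level").isSome
instance (headings : List (List (String × Int))) : Decidable (Pre_filter_appendix_l2_py headings) := by
  unfold Pre_filter_appendix_l2_py; infer_instance

def pvWitness_filter_appendix_l2_py : (List (List (String × Int))) :=
  [[("level", 1)], [("is_appendix", 1), ("level", 1)], [("level", 2)]]

def Spec_filter_appendix_l2_py (headings : List (List (String × Int))) (out : List (List (String × Int))) : Prop := out = filter_appendix_l2_py_alt headings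
instance (headings : List (List (String × Int))) (out : List (List (String × Int))) : Decidable (Spec_filter_appendix_l2_py headings out) := by unfold Spec_filter_appendix_l2_py; infer_instance

-- ===== CLAIM (what is proved, stated in full; the proofs are below) =====
def Claim_equal_filter_appendix_l2_py : Prop := ∀ (headings : List (List (String × Int))), Dom_filter_appendix_l2_py headings → Pre_filter_appendix_l2_py headings → Spec_filter_appendix_l2_py headings (filter_appendix_l2_py headings)

-- ===== LEMMAS AND PROOFS =====
theorem pvRestB_eq (hs : List (List (String × Int))) :
    pvRestB hs = hs.filter (fun x => (pvGetA x "level").getD 0 == 1) := by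
  induction hs with
  | nil => rfl
  | cons h t ih =>
    by_cases h1 : (pvGetA h "level").getD 0 == 1 <;> simp [pvRestB, h1, ih]

theorem pvFindAppA_shift (hs : List (List (String × Int))) (i : Nat) :
    pvFindAppA hs (i + 1) = (pvFindAppA hs i).map (· + 1) := by
  induction hs generalizing i with
  | nil => rfl
  | cons h t ih =>
    by_cases ha : (pvGetA h "is_appendix").any (fun v => v != 0) <;>
      simp [pvFindAppA, ha, ih]

theorem pvScanB_eq (hs pending : List (List (String × Int))) :
    pvScanB pending hs = (pvFindAppA hs 0).map (fun idx =>
      ((pending ++ hs.take idx).filter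
          (fun x => let lv := (pvGetA x "level").getD 0; lv == 1 || lv == 2))
        ++ (hs.drop idx).filter (fun x => (pvGetA x "level").getD 0 == 1)) := by
  induction hs generalizing pending with
  | nil => rfl
  | cons h t ih =>
    by_cases ha : (pvGetA h "is_appendix").any (fun v => v != 0)
    · rw [pvScanB, pvFindAppA]
      simp only [ha, if_true, Option.map_some, List.take_zero, List.drop_zero,
        List.append_nil, List.filter_cons, pvRestB_eq]
      by_cases h1 : (pvGetA h "level").getD 0 == 1 <;> simp [h1]
    · rw [pvScanB, pvFindAppA]
      simp only [ha]
      rw [ih, pvFindAppA_shift]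
      cases pvFindAppA t 0 with
      | none => rfl
      | some idx =>
        simp [List.filter_append, List.filter_cons, List.append_assoc]

theorem pvLoopA_eq (headings : List (List (String × Int))) (idx i : Nat) :
    pvLoopA idx headings i =
      (headings.take (idx - i)).filter (fun h => let lv := (pvGetA h "level").getD 0; lv == 1 || lv == 2)
        ++ (headings.drop (idx - i)).filter (fun h => (pvGetA h "level").getD 0 == 1) := by
  induction headings generalizing i with
  | nil => simp [pvLoopA]
  | cons h t ih =>
    by_cases hlt : i < idx
    · have hsub : idx - i = (idx - (i + 1)) + 1 := by omega
      rw [pvLoopA, hsub]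
      simp only [List.take_succ_cons, List.drop_succ_cons, List.filter_cons]
      rcases e : (pvGetA h "level").getD 0 with n
      by_cases h1 : n = 1
      · simp [h1, ih]
      · by_cases h2 : n = 2
        · simp [h2, hlt, ih]
        · simp [h1, h2, ih]
    · have hsub : idx - i = 0 := by omega
      have hsub' : idx - (i + 1) = 0 := by omega
      rw [pvLoopA, hsub]
      simp only [List.take_zero, List.drop_zero, List.filter_nil, List.nil_append,
        List.filter_cons]
      rcases e : (pvGetA h "level").getD 0 with n
      by_cases h1 : n = 1
      · simpa [h1, hlt, hsub'] using ih (i + 1)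
      · by_cases h2 : n = 2
        · simpa [h1, h2, hlt, hsub'] using ih (i + 1)
        · simpa [h1, h2, hsub'] using ih (i + 1)

-- ===== VERDICT (by name: the statement is the Claim_ definition above) =====
theorem filter_appendix_l2_py_spec : Claim_equal_filter_appendix_l2_py := by
  intro headings _ _
  unfold Spec_filter_appendix_l2_py filter_appendix_l2_py filter_appendix_l2_py_alt
  rw [pvScanB_eq]
  by_cases he : headings = []
  · simp [he, pvFindAppA]
  · simp only [he, if_false]
    cases hf : pvFindAppA headings 0 with
    | none => rfl
    | some idx =>
      simp only [Option.map_some, Option.getD_some, List.nil_append]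
      simpa using pvLoopA_eq headings idx 0
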